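-- pv_equiv track=rewrite | github.com/smiles724/Proteo-R1 | proteor1/cdr_eval/cdr_masking.py | mask_sequence
-- ===== SOURCE A (Python) =====
-- def mask_sequence(
--     sequence: str,
--     indices: list[int],
--     mask_token: str = "X",
-- ) -> str:
--     """
--     Replace residues at specified indices with mask token.
--
--     Args:
--         sequence: Original sequence string
--         indices: Zero-based indices to mask
--         mask_token: Character to use for masking (default: "X")
--
--     Returns:
--         Masked sequence string
--
--     Raises:
--         ValueError: If any index is out of bounds
--     """
--     if not indices:
--         return sequence
--
--     seq_list = list(sequence)
--     for idx in indices: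
--         if idx < 0 or idx >= len(seq_list):
--             raise ValueError(f"Index {idx} out of bounds for sequence length {len(seq_list)}")
--         seq_list[idx] = mask_token
--
--     return "".join(seq_list)
-- ===== SOURCE B (Python) =====
-- def mask_sequence(
--     sequence: str,
--     indices: list[int],
--     mask_token: str = "X",
-- ) -> str:
--     """Replace residues at specified indices with mask token (single-scan version)."""
--     if not indices:
--         return sequence
--
--     n = len(sequence)
--     for idx in indices:
--         if idx < 0 or idx >= n:
--             raise ValueError(f"Index {idx} out of bounds for sequence length {n}")
--
--     mask_set = set(indices)
--     return "".join(mask_token if i in mask_set else ch for i, ch in enumerate(sequence))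
-- ===== Notes on version B (the rewrite author's own statement) =====
-- stated objective: idiomatic
-- what changed: Instead of materialising a mutable character list and assigning at each index, B validates the indices, builds a set of them once, and produces the output in a single enumerate-scan of the sequence with a membership test per character.
import Mathlib
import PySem

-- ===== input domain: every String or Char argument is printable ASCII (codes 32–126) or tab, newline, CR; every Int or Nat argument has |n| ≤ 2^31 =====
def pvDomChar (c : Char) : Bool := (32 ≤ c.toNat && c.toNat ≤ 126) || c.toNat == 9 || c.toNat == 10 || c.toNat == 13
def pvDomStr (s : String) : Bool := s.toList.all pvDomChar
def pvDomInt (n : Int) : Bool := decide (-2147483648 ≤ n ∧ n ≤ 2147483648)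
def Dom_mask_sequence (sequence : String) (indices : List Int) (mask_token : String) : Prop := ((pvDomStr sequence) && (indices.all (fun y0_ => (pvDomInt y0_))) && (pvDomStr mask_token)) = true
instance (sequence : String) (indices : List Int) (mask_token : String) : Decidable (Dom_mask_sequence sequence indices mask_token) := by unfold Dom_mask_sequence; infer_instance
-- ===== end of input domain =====

-- B replaces A's mutate-a-char-list-at-k-positions loop by a single enumerate-scan of the
-- sequence with a set-membership test per character (idiomatic; same cost).


-- ===== PORT A =====
-- seq_list[idx] = mask_token is List.pySetD (total under Pre_, which excludes the raising inputs)
def mask_sequence (sequence : String) (indices : List Int) (mask_token : String) : String :=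
  if indices = [] then sequence
  else
    let seq_list := sequence.toList.map (fun c => String.ofList [c])
    let seq_list := indices.foldl (fun l idx => PySem.List.pySetD l idx mask_token) seq_list
    PySem.Str.join "" seq_list

-- ===== PORT B =====
-- Source B's validation loop only raises (never changes state); those inputs are outside Pre_.
def mask_sequence_alt (sequence : String) (indices : List Int) (mask_token : String) : String :=
  if indices = [] then sequence
  else
    let maskSet : PySem.Set Int := PySem.Set.ofList indices
    PySem.Str.join "" ((PySem.List.enumerate sequence.toList).map
      (fun p => if maskSet.contains p.1 then mask_token else String.ofList [p.2]))

-- ===== PRECONDITION & SPEC =====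
-- Pre_ excludes exactly the inputs where A raises ValueError: a nonempty indices list
-- containing an index outside [0, len(sequence)).
def Pre_mask_sequence (sequence : String) (indices : List Int) (mask_token : String) : Prop :=
  ∀ idx ∈ indices, 0 ≤ idx ∧ idx < (sequence.toList.length : Int)
instance (sequence : String) (indices : List Int) (mask_token : String) : Decidable (Pre_mask_sequence sequence indices mask_token) := by unfold Pre_mask_sequence; infer_instance
def pvWitness_mask_sequence : String × List Int × String := ("ABCDE", [1, 3, 1], "X")

def Spec_mask_sequence (sequence : String) (indices : List Int) (mask_token : String) (out : String) : Prop := out = mask_sequence_alt sequence indices mask_token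
instance (sequence : String) (indices : List Int) (mask_token : String) (out : String) : Decidable (Spec_mask_sequence sequence indices mask_token out) := by unfold Spec_mask_sequence; infer_instance

-- ===== CLAIM (what is proved, stated in full; the proofs are below) =====
def Claim_equal_mask_sequence : Prop := ∀ (sequence : String) (indices : List Int) (mask_token : String), Dom_mask_sequence sequence indices mask_token → Pre_mask_sequence sequence indices mask_token → Spec_mask_sequence sequence indices mask_token (mask_sequence sequence indices mask_token)

-- ===== LEMMAS AND PROOFS =====

theorem pv_foldl_set_length (mask_token : String) (indices : List Int) (init : List String)
    (h : ∀ idx ∈ indices, 0 ≤ idx) :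
    (indices.foldl (fun l idx => PySem.List.pySetD l idx mask_token) init).length = init.length := by
  induction indices generalizing init with
  | nil => rfl
  | cons idx rest ih =>
    simp only [List.foldl_cons]
    rw [ih _ (fun i hi => h i (List.mem_cons_of_mem _ hi)),
        PySem.List.pySetD_of_nonneg init mask_token (h idx List.mem_cons_self), List.length_set]

theorem pv_foldl_set_get (mask_token : String) (indices : List Int) (init : List String)
    (h : ∀ idx ∈ indices, 0 ≤ idx ∧ idx < (init.length : Int)) (k : Nat) (hk : k < init.length) :
    (indices.foldl (fun l idx => PySem.List.pySetD l idx mask_token) init)[k]? =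
      some (if (k : Int) ∈ indices then mask_token else init[k]) := by
  induction indices generalizing init with
  | nil => simp [hk]
  | cons idx rest ih =>
    have h0 := h idx (List.mem_cons_self)
    have hrest : ∀ i ∈ rest, 0 ≤ i ∧ i < ((init.set idx.toNat mask_token).length : Int) := by
      intro i hi; simpa using h i (List.mem_cons_of_mem _ hi)
    simp only [List.foldl_cons, PySem.List.pySetD_of_nonneg init mask_token h0.1]
    rw [ih _ hrest (by simpa using hk)]
    have hidx : idx.toNat < init.length := by omega
    by_cases hm : (k : Int) ∈ rest
    · simp [hm]
    · by_cases he : (k : Int) = idx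
      · have : idx.toNat = k := by omega
        simp [hm, he, this]
      · have : idx.toNat ≠ k := by omega
        simp [hm, he, List.getElem_set, this]

theorem pv_lists_eq (sequence : String) (indices : List Int) (mask_token : String)
    (h : ∀ idx ∈ indices, 0 ≤ idx ∧ idx < (sequence.toList.length : Int)) :
    indices.foldl (fun l idx => PySem.List.pySetD l idx mask_token)
        (sequence.toList.map (fun c => String.ofList [c])) =
      (PySem.List.enumerate sequence.toList).map
        (fun p => if (PySem.Set.ofList indices).contains p.1 then mask_token
                  else String.ofList [p.2]) := by
  have h' : ∀ idx ∈ indices, 0 ≤ idx ∧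
      idx < ((sequence.toList.map (fun c => String.ofList [c])).length : Int) := by
    intro i hi; simpa using h i hi
  apply List.ext_getElem
  · rw [pv_foldl_set_length mask_token indices _ (fun i hi => (h' i hi).1)]
    simp [PySem.List.length_enumerate]
  · intro k h1 h2
    have hk : k < sequence.toList.length := by
      simpa [PySem.List.length_enumerate] using h2
    have hs := pv_foldl_set_get mask_token indices _ h' k (by simpa using hk)
    rw [List.getElem?_eq_getElem h1] at hs
    have h3 := Option.some.inj hs
    rw [h3]
    by_cases hm : (k : Int) ∈ indices
    · simp [List.getElem_map, PySem.List.getElem_enumerate, PySem.Set.mem_ofList, hm]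
    · simp [List.getElem_map, PySem.List.getElem_enumerate, PySem.Set.mem_ofList, hm]

-- ===== VERDICT (by name: the statement is the Claim_ definition above) =====
theorem mask_sequence_spec : Claim_equal_mask_sequence := by
  intro sequence indices mask_token _ hpre
  unfold Spec_mask_sequence mask_sequence mask_sequence_alt
  by_cases hnil : indices = []
  · simp [hnil]
  · simp only [hnil, if_neg hnil, ite_false]
    rw [pv_lists_eq sequence indices mask_token hpre]
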